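-- pv_equiv track=rewrite | github.com/jtmilleer/routeMaker | src/generate_routes.py | remove_spurs
-- ===== SOURCE A (Python) =====
-- def remove_spurs(path):
--     """Remove backtracking of any length by finding edges traversed in both directions."""
--     if len(path) < 3:
--         return path
--
--     stack = [path[0]]
--     for node in path[1:]:
--         if len(stack) >= 2 and stack[-2] == node:
--             stack.pop()
--         else:
--             stack.append(node)
--     return stack
-- ===== SOURCE B (Python) =====
-- def remove_spurs(path):
--     """Remove backtracking spurs by repeated local cancellation until a fixpoint."""
--     if len(path) < 3:
--         return path
--     cur = list(path)
--     while True: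
--         for i in range(1, len(cur) - 1):
--             if cur[i - 1] == cur[i + 1]:
--                 del cur[i:i + 2]
--                 break
--         else:
--             return cur
-- ===== Notes on version B (the rewrite author's own statement) =====
-- stated objective: alternative
-- what changed: Replaces the single stack pass with repeated leftmost local cancellation of a,b,a patterns on a copy of the path until a fixpoint is reached; both compute the unique spur-free reduced walk.
import Mathlib
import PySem

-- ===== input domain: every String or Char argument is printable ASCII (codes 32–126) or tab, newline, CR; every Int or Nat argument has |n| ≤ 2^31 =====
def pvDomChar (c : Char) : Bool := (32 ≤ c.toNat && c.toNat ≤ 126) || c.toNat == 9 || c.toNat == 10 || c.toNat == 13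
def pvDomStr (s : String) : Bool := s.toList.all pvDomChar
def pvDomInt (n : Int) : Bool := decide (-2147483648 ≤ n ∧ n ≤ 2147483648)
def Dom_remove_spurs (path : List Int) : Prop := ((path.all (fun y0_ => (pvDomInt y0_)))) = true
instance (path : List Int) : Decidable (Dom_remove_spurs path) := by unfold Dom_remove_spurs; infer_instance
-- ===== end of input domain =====

-- B replaces A's single stack pass by repeated leftmost cancellation of a,b,a spurs to a fixpoint (alternative decomposition, not faster).

-- ===== PORT A =====
-- one iteration of A's loop body: pop if stack[-2] == node else append
def pyStep (stack : List Int) (node : Int) : List Int :=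
  if 2 ≤ stack.length ∧ PySem.List.pyGet? stack (-2) = some node
  then stack.dropLast else stack ++ [node]

def remove_spurs (path : List Int) : List Int :=
  if path.length < 3 then path
  else
    match path with
    | [] => path  -- unreachable: length ≥ 3
    | p0 :: rest => rest.foldl pyStep [p0]

-- ===== PORT B =====
-- the inner for-loop of Source B: first i with cur[i-1] == cur[i+1]; delete cur[i], cur[i+1]
def findDel : List Int → Option (List Int)
  | a :: b :: c :: t => if a = c then some (a :: t) else (findDel (b :: c :: t)).map (a :: ·)
  | _ => none

theorem findDel_length : ∀ (l l' : List Int), findDel l = some l' → l'.length + 2 = l.length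
  | a :: b :: c :: t, l', h => by
    by_cases hac : a = c
    · simp [findDel, hac] at h; subst h; simp
    · simp only [findDel, if_neg hac, Option.map_eq_some_iff] at h
      obtain ⟨m, hm, rfl⟩ := h
      have := findDel_length (b :: c :: t) m hm
      simp at this ⊢; omega
  | [], _, h => by simp [findDel] at h
  | [_], _, h => by simp [findDel] at h
  | [_, _], _, h => by simp [findDel] at h

-- the while-loop of Source B: repeat until no deletion happens
def reduceLoop (l : List Int) : List Int :=
  match h : findDel l with
  | some l' => reduceLoop l'
  | none => l
termination_by l.length
decreasing_by have := findDel_length l _ h; omega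

def remove_spurs_alt (path : List Int) : List Int :=
  if path.length < 3 then path else reduceLoop path

-- ===== PRECONDITION & SPEC =====
def Spec_remove_spurs (path : List Int) (out : List Int) : Prop := out = remove_spurs_alt path
instance (path : List Int) (out : List Int) : Decidable (Spec_remove_spurs path out) := by unfold Spec_remove_spurs; infer_instance

-- ===== CLAIM (what is proved, stated in full; the proofs are below) =====
def Claim_equal_remove_spurs : Prop := ∀ (path : List Int), Dom_remove_spurs path → Spec_remove_spurs path (remove_spurs path)

-- ===== LEMMAS AND PROOFS =====

-- A's stack step on the reversed stack (cons/pattern form, easier to reason about)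
def rStep (r : List Int) (x : Int) : List Int :=
  match r with
  | p :: q :: t => if q = x then q :: t else x :: p :: q :: t
  | _ => x :: r

-- no "a b a" pattern anywhere in the list
def noAba : List Int → Prop
  | a :: b :: c :: t => a ≠ c ∧ noAba (b :: c :: t)
  | _ => True

theorem pyStep_rev : ∀ (r : List Int) (x : Int), pyStep r.reverse x = (rStep r x).reverse
  | [], x => by simp [pyStep, rStep, PySem.List.pyGet?]
  | [p], x => by simp [pyStep, rStep, PySem.List.pyGet?]
  | p :: q :: t, x => by
    have hget : PySem.List.pyGet? (p :: q :: t).reverse (-2) = some q := by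
      rw [PySem.List.pyGet?_neg_ofNat _ 2 (by omega) (by simp)]
      have : (p :: q :: t).reverse = (t.reverse ++ [q]) ++ [p] := by simp
      rw [this]
      simp
    by_cases hqx : q = x
    · have hcond : 2 ≤ (p :: q :: t).reverse.length ∧
          PySem.List.pyGet? (p :: q :: t).reverse (-2) = some x := by
        exact ⟨by simp, hqx ▸ hget⟩
      rw [pyStep, if_pos hcond, rStep]
      simp [hqx]
    · have hcond : ¬ (2 ≤ (p :: q :: t).reverse.length ∧
          PySem.List.pyGet? (p :: q :: t).reverse (-2) = some x) := by
        rintro ⟨-, hc⟩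
        rw [hget] at hc
        exact hqx (Option.some.inj hc)
      rw [pyStep, if_neg hcond, rStep]
      simp [hqx]

theorem foldl_pyStep_rev (l : List Int) (r : List Int) :
    l.foldl pyStep r.reverse = (l.foldl rStep r).reverse := by
  induction l generalizing r with
  | nil => rfl
  | cons x t ih => simp only [List.foldl_cons, pyStep_rev, ih]

theorem noAba_tail {x : Int} {l : List Int} (h : noAba (x :: l)) : noAba l := by
  match l with
  | [] => trivial
  | [_] => trivial
  | _ :: _ :: _ => exact h.2

theorem noAba_append_right {u v : List Int} (h : noAba (u ++ v)) : noAba v := by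
  induction u with
  | nil => exact h
  | cons a t ih => exact ih (noAba_tail h)

theorem noAba_rStep {r : List Int} (x : Int) (h : noAba r) : noAba (rStep r x) := by
  match r with
  | [] => trivial
  | [p] => simp [rStep, noAba]
  | p :: q :: t =>
    by_cases hqx : q = x
    · simpa [rStep, hqx] using noAba_tail h
    · simp only [rStep, if_neg hqx, noAba]
      exact ⟨fun e => hqx e.symm, h⟩

theorem rStep_core : ∀ {r : List Int} (a b : Int), noAba r →
    rStep (rStep (rStep r a) b) a = rStep r a
  | [], a, b, _ => by simp [rStep]
  | [p], a, b, _ => by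
    by_cases hpb : p = b <;> simp [rStep, hpb]
  | [p, q], a, b, h => by
    by_cases hqa : q = a
    · by_cases hpb : p = b <;> simp [rStep, hqa]
    · by_cases hpb : p = b <;> simp [rStep, hqa, hpb]
  | p :: q :: c :: t, a, b, h => by
    by_cases hqa : q = a
    · subst hqa
      -- rStep pops: result q :: c :: t with head q = a
      by_cases hcb : c = b
      · subst hcb
        -- second step pops to c :: t; third step pushes back (t head ≠ a by noAba)
        match t, h with
        | [], _ => simp [rStep]
        | d :: t', h =>
          have hqd : q ≠ d := (noAba_tail h).1
          simp [rStep, Ne.symm hqd]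
      · match t, h with
        | [], _ => simp [rStep, hcb]
        | d :: t', _ =>
          simp [rStep, hcb]
    · -- rStep pushes: a :: p :: q :: c :: t
      by_cases hpb : p = b <;> simp [rStep, hqa, hpb]

theorem reduceLoop_some {l l' : List Int} (h : findDel l = some l') :
    reduceLoop l = reduceLoop l' := by
  rw [reduceLoop]; split <;> simp_all

theorem reduceLoop_none {l : List Int} (h : findDel l = none) : reduceLoop l = l := by
  rw [reduceLoop]; split <;> simp_all

theorem foldl_rStep_findDel : ∀ {l l' : List Int}, findDel l = some l' → ∀ (r : List Int),
    noAba r → l.foldl rStep r = l'.foldl rStep r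
  | a :: b :: c :: t, l', h, r, hr => by
    by_cases hac : a = c
    · subst hac
      simp [findDel] at h
      subst h
      simp only [List.foldl_cons]
      rw [rStep_core a b hr]
    · simp only [findDel, if_neg hac, Option.map_eq_some_iff] at h
      obtain ⟨m, hm, rfl⟩ := h
      simp only [List.foldl_cons]
      exact foldl_rStep_findDel hm _ (noAba_rStep a hr)
  | [], _, h, _, _ => by simp [findDel] at h
  | [_], _, h, _, _ => by simp [findDel] at h
  | [_, _], _, h, _, _ => by simp [findDel] at h

theorem foldl_rStep_reduceLoop (l : List Int) : ∀ (r : List Int), noAba r →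
    l.foldl rStep r = (reduceLoop l).foldl rStep r := by
  induction l using reduceLoop.induct with
  | case1 l l' hfd ih =>
    intro r hr
    rw [reduceLoop_some hfd, foldl_rStep_findDel hfd r hr]
    exact ih r hr
  | case2 l hfd => intro r hr; rw [reduceLoop_none hfd]

theorem noAba_of_findDel_none : ∀ {l : List Int}, findDel l = none → noAba l
  | a :: b :: c :: t, h => by
    by_cases hac : a = c
    · simp [findDel, hac] at h
    · simp only [findDel, if_neg hac, Option.map_eq_none_iff] at h
      exact ⟨hac, noAba_of_findDel_none h⟩
  | [], _ => trivial
  | [_], _ => trivial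
  | [_, _], _ => trivial

theorem findDel_reduceLoop (l : List Int) : findDel (reduceLoop l) = none := by
  induction l using reduceLoop.induct with
  | case1 l l' hfd ih => rw [reduceLoop_some hfd]; exact ih
  | case2 l hfd => rw [reduceLoop_none hfd]; exact hfd

theorem rStep_push {r : List Int} {x : Int}
    (h : ∀ p q t, r = p :: q :: t → q ≠ x) : rStep r x = x :: r := by
  match r with
  | [] => rfl
  | [_] => rfl
  | p :: q :: t => simp [rStep, h p q t rfl]

theorem foldl_rStep_noAba : ∀ {l : List Int} (r : List Int), noAba (r.reverse ++ l) →
    l.foldl rStep r = l.reverse ++ r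
  | [], r, _ => by simp
  | x :: t, r, h => by
    have hpush : rStep r x = x :: r := by
      apply rStep_push
      intro p q t' hr
      subst hr
      have : noAba (q :: p :: x :: t) := by
        have := noAba_append_right (u := t'.reverse) (v := q :: p :: x :: t)
        apply this
        simpa using h
      exact this.1
    simp only [List.foldl_cons, hpush]
    rw [foldl_rStep_noAba (x :: r) (by simpa using h)]
    simp

-- ===== VERDICT (by name: the statement is the Claim_ definition above) =====
theorem remove_spurs_spec : Claim_equal_remove_spurs := by
  intro path _
  unfold Spec_remove_spurs remove_spurs remove_spurs_alt
  by_cases hlen : path.length < 3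
  · simp [hlen]
  · simp only [hlen, if_false]
    match path, hlen with
    | p0 :: rest, _ =>
      have h0 : ([p0] : List Int) = pyStep [] p0 := by simp [pyStep, PySem.List.pyGet?]
      have hrev : ([] : List Int) = ([] : List Int).reverse := rfl
      calc rest.foldl pyStep [p0]
          = (p0 :: rest).foldl pyStep ([] : List Int).reverse := by
            simp [List.foldl_cons, h0]
        _ = ((p0 :: rest).foldl rStep []).reverse := foldl_pyStep_rev _ _
        _ = ((reduceLoop (p0 :: rest)).foldl rStep []).reverse := by
            rw [foldl_rStep_reduceLoop _ _ (by trivial)]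
        _ = reduceLoop (p0 :: rest) := by
            rw [foldl_rStep_noAba [] (by simpa using noAba_of_findDel_none (findDel_reduceLoop _))]
            simp
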